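-- pv_equiv track=rewrite | github.com/darkknight001/JSP-pepcoding | DP/06-Goldmine.py | maxGoldMemo
-- ===== SOURCE A (Python) =====
-- def maxGoldMemo(r, c, mine, dp):
--     if r<0 or r>=len(mine):
--         return 0
--     if dp[r][c]!=-1:
--         return dp[r][c]
--
--     if c==len(mine[0])-1:
--         return mine[r][c]
--
--     up  = maxGoldMemo(r-1, c+1, mine, dp)
--     right = maxGoldMemo(r, c+1, mine, dp)
--     down = maxGoldMemo(r+1, c+1, mine, dp)
--
--     dp[r][c] = max(up, right, down) + mine[r][c]
--     return dp[r][c]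
-- ===== SOURCE B (Python) =====
-- # Iterative bottom-up tabulation (columns right-to-left) instead of A's top-down
-- # memoized recursion; returns the same value but does not mutate dp (A writes memo
-- # entries into dp in place).
-- def maxGoldMemo(r, c, mine, dp):
--     if r < 0 or r >= len(mine):
--         return 0
--     n = len(mine[0])
--     cur = None
--     for col in range(n - 1, c - 1, -1):
--         prev = cur
--         cur = []
--         for row in range(len(mine)):
--             if dp[row][col] != -1:
--                 v = dp[row][col]
--             elif col == n - 1:
--                 v = mine[row][col]
--             else:
--                 up = prev[row - 1] if row >= 1 else 0
--                 down = prev[row + 1] if row + 1 < len(mine) else 0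
--                 v = max(up, prev[row], down) + mine[row][col]
--             cur.append(v)
--     return cur[r]
-- ===== Notes on version B (the rewrite author's own statement) =====
-- stated objective: alternative
-- what changed: Top-down memoized recursion (which writes memo entries into dp in place) is replaced by an iterative bottom-up tabulation that sweeps the columns right-to-left, building each column's value vector from the previous one; B never mutates dp.
-- outside the precondition, e.g. on maxGoldMemo(1, -3, [[5, 1, 7], [6, 7, 7]], [[8, -1, -1], [-1, -1, -1]]): A returns 34, B returns 40; on maxGoldMemo(0, 1, [[1, 2], [3]], [[-1, -1], [-1]]): A returns 2, B raises IndexError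
import Mathlib
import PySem

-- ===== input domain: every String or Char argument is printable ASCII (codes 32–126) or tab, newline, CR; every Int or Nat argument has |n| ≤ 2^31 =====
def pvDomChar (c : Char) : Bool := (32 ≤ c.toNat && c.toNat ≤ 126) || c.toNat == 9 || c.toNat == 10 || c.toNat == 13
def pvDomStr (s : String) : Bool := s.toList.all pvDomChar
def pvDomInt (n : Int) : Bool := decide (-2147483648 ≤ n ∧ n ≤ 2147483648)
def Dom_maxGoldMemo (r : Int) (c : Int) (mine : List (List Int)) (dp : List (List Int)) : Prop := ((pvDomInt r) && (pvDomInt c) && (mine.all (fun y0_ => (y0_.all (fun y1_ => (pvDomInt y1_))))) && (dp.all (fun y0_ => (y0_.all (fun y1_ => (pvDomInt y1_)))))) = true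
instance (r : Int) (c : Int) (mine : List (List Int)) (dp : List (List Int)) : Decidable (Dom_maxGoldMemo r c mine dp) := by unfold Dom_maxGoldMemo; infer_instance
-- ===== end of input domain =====

-- B replaces A's top-down memoized recursion by an iterative bottom-up tabulation over the
-- columns; equivalence is about the RETURN value only (A writes memo entries into dp in place,
-- B does not mutate dp).

-- ===== PORT A =====
-- A's recursion threads the mutable dp through the calls; fuel only makes the recursion
-- structural (none = IndexError; the fuel is always large enough for every terminating run).
def maxGoldMemoAux : Nat → Int → Int → List (List Int) → List (List Int) → Option (Int × List (List Int))
  | 0, _, _, _, _ => none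
  | fuel+1, r, c, mine, dp =>
    if r < 0 ∨ (mine.length : Int) ≤ r then some (0, dp) else
    match PySem.List.pyGet? dp r with                     -- dp[r]
    | none => none
    | some drow =>
      match PySem.List.pyGet? drow c with                 -- dp[r][c]
      | none => none
      | some v =>
        if v ≠ -1 then some (v, dp) else
        match PySem.List.pyGet? mine 0 with               -- mine[0]
        | none => none
        | some m0 =>
          if c = (m0.length : Int) - 1 then
            match PySem.List.pyGet? mine r with           -- mine[r]
            | none => none
            | some mrow =>
              match PySem.List.pyGet? mrow c with         -- mine[r][c]
              | none => none
              | some mv => some (mv, dp)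
          else
            match maxGoldMemoAux fuel (r-1) (c+1) mine dp with
            | none => none
            | some (up, dp1) =>
              match maxGoldMemoAux fuel r (c+1) mine dp1 with
              | none => none
              | some (rt, dp2) =>
                match maxGoldMemoAux fuel (r+1) (c+1) mine dp2 with
                | none => none
                | some (dn, dp3) =>
                  match PySem.List.pyGet? mine r with     -- mine[r]
                  | none => none
                  | some mrow =>
                    match PySem.List.pyGet? mrow c with   -- mine[r][c]
                    | none => none
                    | some mv =>
                      let w := max (max up rt) dn + mv
                      match PySem.List.pyGet? dp3 r with  -- dp[r]
                      | none => none
                      | some drow3 =>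
                        match PySem.List.pySet? drow3 c w with      -- dp[r][c] = w
                        | none => none
                        | some drow3' =>
                          match PySem.List.pySet? dp3 r drow3' with
                          | none => none
                          | some dp4 => some (w, dp4)

-- fuel bound: each call increases c by 1 and every path stops once c reaches the longest dp
-- row's length; 4294967299 covers any Dom-bounded starting c.
def pvFuel (dp : List (List Int)) : Nat := dp.foldl (fun m row => max m row.length) 0 + 4294967299

def maxGoldMemo (r : Int) (c : Int) (mine : List (List Int)) (dp : List (List Int)) : Int :=
  ((maxGoldMemoAux (pvFuel dp) r c mine dp).map Prod.fst).getD 0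

-- ===== PORT B =====
-- one inner-loop body of Source B: the value appended for a given row of column col
-- (row comes from range(len(mine)), so it is a Nat and 'row - 1 >= 0' is '1 ≤ row')
def pvCell (mine dp : List (List Int)) (n : Int) (prev : Option (List Int)) (col : Int) (row : Nat) : Int :=
  let dv := PySem.List.pyGetD (dp.getD row []) col 0
  if dv ≠ -1 then dv
  else if col = n - 1 then PySem.List.pyGetD (mine.getD row []) col 0
  else
    let p := prev.getD []
    let up := if 1 ≤ row then p.getD (row-1) 0 else 0
    let dn := if row + 1 < mine.length then p.getD (row+1) 0 else 0
    max (max up (p.getD row 0)) dn + PySem.List.pyGetD (mine.getD row []) col 0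

def maxGoldMemo_alt (r : Int) (c : Int) (mine : List (List Int)) (dp : List (List Int)) : Int :=
  if r < 0 ∨ (mine.length : Int) ≤ r then 0 else
  -- n = len(mine[0]); here r is in range so mine ≠ []
  let n : Int := ((mine.headD []).length : Int)
  let cur : Option (List Int) :=
    (PySem.List.pyRange (n-1) (c-1) (-1)).foldl (fun prev col =>
      some ((List.range mine.length).foldl (fun acc row =>
        acc ++ [pvCell mine dp n prev col row]) [])) none
  match cur with
  | some l => PySem.List.pyGetD l r 0
  | none => 0        -- cur is None: Python raises TypeError (outside Pre_)

-- ===== PRECONDITION & SPEC =====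
-- Pre_ restricts, for in-range r, to the task's natural domain: every dp row that belongs to the
-- grid is at least as wide as mine[0], mine[i][k] exists wherever dp[i][k] is an unfilled memo
-- slot (= -1, the only places either program reads mine), and the start column lies inside
-- [0, len(mine[0])).  Outside it A raises IndexError on the cells it visits, or returns values
-- read off ragged rows that B's whole-column sweep cannot traverse, or — for a start column
-- c < 0, outside the grid — a value that depends on Python's negative indices into the partially
-- filled memo, which a left-to-right tabulation legitimately computes differently (see cites).
def Pre_maxGoldMemo (r : Int) (c : Int) (mine : List (List Int)) (dp : List (List Int)) : Prop :=
  (r < 0 ∨ (mine.length : Int) ≤ r) ∨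
  ( mine.length ≤ dp.length ∧
    (∀ row ∈ dp.take mine.length, (mine.headD []).length ≤ row.length) ∧
    (∀ i < mine.length, ∀ k < (mine.headD []).length,
      (dp.getD i []).getD k 0 = -1 → k < (mine.getD i []).length) ∧
    0 ≤ c ∧ c < ((mine.headD []).length : Int) )
instance (r : Int) (c : Int) (mine : List (List Int)) (dp : List (List Int)) : Decidable (Pre_maxGoldMemo r c mine dp) := by unfold Pre_maxGoldMemo; infer_instance

def pvWitness_maxGoldMemo : Int × Int × List (List Int) × List (List Int) :=
  (0, 0, [[1,2],[3,4]], [[-1,-1],[-1,-1]])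

def Spec_maxGoldMemo (r : Int) (c : Int) (mine : List (List Int)) (dp : List (List Int)) (out : Int) : Prop := out = maxGoldMemo_alt r c mine dp
instance (r : Int) (c : Int) (mine : List (List Int)) (dp : List (List Int)) (out : Int) : Decidable (Spec_maxGoldMemo r c mine dp out) := by unfold Spec_maxGoldMemo; infer_instance

-- ===== CLAIM (what is proved, stated in full; the proofs are below) =====
def Claim_equal_maxGoldMemo : Prop := ∀ (r : Int) (c : Int) (mine : List (List Int)) (dp : List (List Int)), Dom_maxGoldMemo r c mine dp → Pre_maxGoldMemo r c mine dp → Spec_maxGoldMemo r c mine dp (maxGoldMemo r c mine dp)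

-- ===== LEMMAS AND PROOFS =====

-- the common recurrence value of cell (row i, column nn-1-j), computed from the ORIGINAL dp
def pvVal (mine dp : List (List Int)) (nn : Nat) : Nat → Nat → Int
  | 0, i =>
      if (dp.getD i []).getD (nn-1) 0 ≠ -1 then (dp.getD i []).getD (nn-1) 0
      else (mine.getD i []).getD (nn-1) 0
  | (j+1), i =>
      if (dp.getD i []).getD (nn-1-(j+1)) 0 ≠ -1 then (dp.getD i []).getD (nn-1-(j+1)) 0
      else max (max (if 1 ≤ i then pvVal mine dp nn j (i-1) else 0) (pvVal mine dp nn j i))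
               (if i+1 < mine.length then pvVal mine dp nn j (i+1) else 0)
           + (mine.getD i []).getD (nn-1-(j+1)) 0

-- invariant for A's threaded dp: lengths unchanged, every cell either untouched or a memo
-- entry holding its recurrence value (and originally -1)
def pvGood (mine dp0 : List (List Int)) (nn : Nat) (dp' : List (List Int)) : Prop :=
  dp'.length = dp0.length ∧
  ∀ i < mine.length, (dp'.getD i []).length = (dp0.getD i []).length ∧
    ∀ k < nn, (dp'.getD i []).getD k 0 = (dp0.getD i []).getD k 0 ∨
      ((dp0.getD i []).getD k 0 = -1 ∧ (dp'.getD i []).getD k 0 = pvVal mine dp0 nn (nn-1-k) i)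

theorem pvGet_some {α : Type} (xs : List α) (d : α) (i : Int) (h0 : 0 ≤ i)
    (h : i.toNat < xs.length) : PySem.List.pyGet? xs i = some (xs.getD i.toNat d) := by
  rw [PySem.List.pyGet?_of_nonneg xs h0]
  simp [List.getElem?_eq_getElem h, List.getD_eq_getElem _ _ h]

theorem pvFoldlMax_ge (dp : List (List Int)) (row : List Int) (hmem : row ∈ dp) (acc : Nat) :
    row.length ≤ dp.foldl (fun m r => max m r.length) acc := by
  have hmono : ∀ (l : List (List Int)) (a : Nat), a ≤ l.foldl (fun m r => max m r.length) a := by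
    intro l
    induction l with
    | nil => intro a; simp
    | cons y ys ih2 => intro a; exact le_trans (le_max_left a y.length) (ih2 _)
  induction dp generalizing acc with
  | nil => cases hmem
  | cons x xs ih =>
    rcases List.mem_cons.mp hmem with h | h
    · subst h
      exact le_trans (le_max_right acc row.length) (hmono xs _)
    · exact ih h _

theorem pvSet_getD {α : Type} (xs : List α) (m i : Nat) (a d : α) :
    (xs.set m a).getD i d = if m = i ∧ m < xs.length then a else xs.getD i d := by
  rw [List.getD_eq_getElem?_getD, List.getD_eq_getElem?_getD, List.getElem?_set]
  by_cases h1 : m = i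
  · subst h1
    by_cases h2 : m < xs.length
    · simp [h2]
    · simp [h2, List.getElem?_eq_none (by omega : xs.length ≤ m)]
  · simp [h1, fun hc : m = i ∧ m < xs.length => h1 hc.1]

theorem pvVal_of_ne (mine dp0 : List (List Int)) (nn : Nat) (i k : Nat) (hk : k < nn)
    (hne : (dp0.getD i []).getD k 0 ≠ -1) :
    pvVal mine dp0 nn (nn-1-k) i = (dp0.getD i []).getD k 0 := by
  rcases h : nn - 1 - k with _ | j
  · have hk' : k = nn - 1 := by omega
    subst hk'
    simp only [pvVal]
    rw [if_pos hne]
  · have hcol : nn - 1 - (j+1) = k := by omega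
    simp only [pvVal, hcol]
    rw [if_pos hne]

-- one unfolding step of the recurrence in A's Int coordinates
theorem pvVal_step (mine dp0 : List (List Int)) (nn : Nat) (r c : Int)
    (h0 : 0 ≤ c) (hc : c + 1 < (nn : Int)) (hr0 : 0 ≤ r) (hrlt : r < (mine.length : Int))
    (hd0 : (dp0.getD r.toNat []).getD c.toNat 0 = -1) :
    pvVal mine dp0 nn (nn-1-c.toNat) r.toNat =
      max (max (if 0 ≤ r - 1 ∧ r - 1 < (mine.length : Int) then pvVal mine dp0 nn (nn-1-(c+1).toNat) (r-1).toNat else 0)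
               (if 0 ≤ r ∧ r < (mine.length : Int) then pvVal mine dp0 nn (nn-1-(c+1).toNat) r.toNat else 0))
          (if 0 ≤ r + 1 ∧ r + 1 < (mine.length : Int) then pvVal mine dp0 nn (nn-1-(c+1).toNat) (r+1).toNat else 0)
      + (mine.getD r.toNat []).getD c.toNat 0 := by
  have hj : nn - 1 - c.toNat = (nn - 1 - (c+1).toNat) + 1 := by omega
  have hcol : nn - 1 - ((nn - 1 - (c+1).toNat) + 1) = c.toNat := by omega
  rw [hj]
  simp only [pvVal, hcol, hd0]
  rw [if_neg (by simp)]
  have eup : (if 1 ≤ r.toNat then pvVal mine dp0 nn (nn-1-(c+1).toNat) (r.toNat-1) else 0)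
      = (if 0 ≤ r - 1 ∧ r - 1 < (mine.length : Int) then pvVal mine dp0 nn (nn-1-(c+1).toNat) (r-1).toNat else 0) := by
    by_cases h : 1 ≤ r.toNat
    · rw [if_pos h, if_pos (by omega), show (r-1).toNat = r.toNat - 1 by omega]
    · rw [if_neg h, if_neg (by omega)]
  have emid : (if 0 ≤ r ∧ r < (mine.length : Int) then pvVal mine dp0 nn (nn-1-(c+1).toNat) r.toNat else 0)
      = pvVal mine dp0 nn (nn-1-(c+1).toNat) r.toNat := if_pos ⟨hr0, hrlt⟩
  have edn : (if r.toNat + 1 < mine.length then pvVal mine dp0 nn (nn-1-(c+1).toNat) (r.toNat+1) else 0)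
      = (if 0 ≤ r + 1 ∧ r + 1 < (mine.length : Int) then pvVal mine dp0 nn (nn-1-(c+1).toNat) (r+1).toNat else 0) := by
    by_cases h : r.toNat + 1 < mine.length
    · rw [if_pos h, if_pos (by omega), show (r+1).toNat = r.toNat + 1 by omega]
    · rw [if_neg h, if_neg (by omega)]
  rw [eup, emid, edn]

-- writing the freshly computed memo value preserves the invariant
theorem pvGood_write (mine dp0 : List (List Int)) (nn : Nat)
    (hd : ∀ i < mine.length, nn ≤ (dp0.getD i []).length)
    (dp3 : List (List Int)) (hg : pvGood mine dp0 nn dp3) (i k : Nat)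
    (hi : i < mine.length) (hk : k < nn)
    (hd0 : (dp0.getD i []).getD k 0 = -1) (w : Int) (hw : w = pvVal mine dp0 nn (nn-1-k) i) :
    pvGood mine dp0 nn (dp3.set i ((dp3.getD i []).set k w)) := by
  obtain ⟨hlen, hcells⟩ := hg
  refine ⟨by simpa using hlen, ?_⟩
  intro i' hi'
  obtain ⟨hL', hc'⟩ := hcells i' hi'
  rw [pvSet_getD]
  split_ifs with hii
  · obtain ⟨rfl, _⟩ := hii
    obtain ⟨hLi, hci⟩ := hcells i hi
    constructor
    · simpa using hLi
    · intro k' hk'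
      rw [pvSet_getD]
      split_ifs with hkk
      · obtain ⟨rfl, _⟩ := hkk
        exact Or.inr ⟨hd0, hw⟩
      · have hkd : ¬ (k = k') := by
          intro heq
          have h2 := hd i hi
          exact hkk ⟨heq, by omega⟩
        exact hci k' hk'
  · exact ⟨hL', hc'⟩

theorem pvRange_single (a : Int) : PySem.List.pyRange a (a-1) (-1) = [a] := by
  rw [PySem.List.pyRange_neg_one_cons (by omega), PySem.List.pyRange_neg_one_eq_nil (by omega)]

theorem pvRange_snoc (a b : Int) (h : b < a) :
    PySem.List.pyRange a b (-1) = PySem.List.pyRange a (b+1) (-1) ++ [b+1] := by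
  rw [PySem.List.pyRange_neg_one_eq_reverse, PySem.List.pyRange_one_cons (by omega),
      PySem.List.pyRange_neg_one_eq_reverse]
  simp

theorem aux_ok (mine dp0 : List (List Int)) (nn : Nat)
    (hhead : (mine.headD []).length = nn)
    (hm : ∀ i < mine.length, ∀ k < nn, (dp0.getD i []).getD k 0 = -1 → k < (mine.getD i []).length)
    (hlen : mine.length ≤ dp0.length)
    (hd : ∀ i < mine.length, nn ≤ (dp0.getD i []).length) :
    ∀ (fuel : Nat) (r c : Int) (dp' : List (List Int)), 0 ≤ c → c < (nn : Int) →
      nn - c.toNat ≤ fuel → pvGood mine dp0 nn dp' →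
      ∃ dp'', maxGoldMemoAux fuel r c mine dp' =
        some ((if 0 ≤ r ∧ r < (mine.length : Int) then pvVal mine dp0 nn (nn-1-c.toNat) r.toNat else 0), dp'')
        ∧ pvGood mine dp0 nn dp'' := by
  intro fuel
  induction fuel with
  | zero => intro r c dp' h0 h1 hf hg; omega
  | succ f ih =>
    intro r c dp' h0 h1 hf hg
    by_cases hr : r < 0 ∨ (mine.length : Int) ≤ r
    · refine ⟨dp', ?_, hg⟩
      simp only [maxGoldMemoAux, if_pos hr]
      rw [if_neg (by omega)]
    · push_neg at hr
      obtain ⟨hr0, hrlt⟩ := hr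
      have hrows : 0 < mine.length := by omega
      have hrn : r.toNat < mine.length := by omega
      obtain ⟨hL, hcells⟩ := hg.2 r.toNat hrn
      have hdplen : r.toNat < dp'.length := by have := hg.1; omega
      have hrowlen : nn ≤ (dp'.getD r.toNat []).length := by rw [hL]; exact hd r.toNat hrn
      have hcn : c.toNat < nn := by omega
      have e1 : PySem.List.pyGet? dp' r = some (dp'.getD r.toNat []) := pvGet_some _ [] _ hr0 hdplen
      have e2 : PySem.List.pyGet? (dp'.getD r.toNat []) c = some ((dp'.getD r.toNat []).getD c.toNat 0) :=
        pvGet_some _ 0 _ h0 (by omega)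
      obtain ⟨m0, rest, hmine⟩ : ∃ m0 rest, mine = m0 :: rest := by
        cases mine with
        | nil => simp at hrows
        | cons x xs => exact ⟨x, xs, rfl⟩
      have hm0 : m0.length = nn := by rw [← hhead, hmine]; rfl
      have e3 : PySem.List.pyGet? mine 0 = some m0 := by
        rw [hmine]; exact PySem.List.pyGet?_zero_cons m0 rest
      have e4 : PySem.List.pyGet? mine r = some (mine.getD r.toNat []) := pvGet_some _ [] _ hr0 hrn
      have hcase := hcells c.toNat hcn
      simp only [maxGoldMemoAux, if_neg (by omega : ¬(r < 0 ∨ (mine.length : Int) ≤ r)), e1, e2]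
      by_cases hv : (dp'.getD r.toNat []).getD c.toNat 0 ≠ -1
      · refine ⟨dp', ?_, hg⟩
        rw [if_pos hv, if_pos ⟨hr0, hrlt⟩]
        rcases hcase with heq | ⟨hd0, hval⟩
        · rw [heq] at hv ⊢
          rw [pvVal_of_ne mine dp0 nn r.toNat c.toNat hcn hv]
        · rw [hval]
      · rw [if_neg hv]
        push_neg at hv
        have hd0 : (dp0.getD r.toNat []).getD c.toNat 0 = -1 := by
          rcases hcase with heq | ⟨hd0', _⟩
          · rw [← heq]; exact hv
          · exact hd0'
        have e5 : PySem.List.pyGet? (mine.getD r.toNat []) c =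
            some ((mine.getD r.toNat []).getD c.toNat 0) :=
          pvGet_some _ 0 _ h0 (hm r.toNat hrn c.toNat hcn hd0)
        simp only [e3]
        by_cases hc : c = (m0.length : Int) - 1
        · rw [if_pos hc]
          simp only [e4, e5]
          refine ⟨dp', ?_, hg⟩
          rw [if_pos ⟨hr0, hrlt⟩]
          have hcnn : c.toNat = nn - 1 := by omega
          have hj : nn - 1 - c.toNat = 0 := by omega
          rw [hj, hcnn]
          simp only [pvVal]
          rw [if_neg (show ¬((dp0.getD r.toNat []).getD (nn-1) 0 ≠ -1) by
            rw [hcnn] at hd0; exact fun hcon => hcon hd0)]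
        · rw [if_neg hc]
          have hc1' : c + 1 < (nn : Int) := by rw [hm0] at hc; omega
          have hff : nn - (c+1).toNat ≤ f := by omega
          obtain ⟨dp1, ea, hga⟩ := ih (r-1) (c+1) dp' (by omega) hc1' hff hg
          obtain ⟨dp2, eb, hgb⟩ := ih r (c+1) dp1 (by omega) hc1' hff hga
          obtain ⟨dp3, ec, hgc⟩ := ih (r+1) (c+1) dp2 (by omega) hc1' hff hgb
          simp only [ea, eb, ec, e4, e5]
          have hdp3len : r.toNat < dp3.length := by have := hgc.1; omega
          have hrow3 : nn ≤ (dp3.getD r.toNat []).length := by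
            have h := (hgc.2 r.toNat hrn).1
            rw [h]; exact hd r.toNat hrn
          have e6 : PySem.List.pyGet? dp3 r = some (dp3.getD r.toNat []) := pvGet_some _ [] _ hr0 hdp3len
          simp only [e6]
          have e7 : ∀ w : Int, PySem.List.pySet? (dp3.getD r.toNat []) c w
              = some ((dp3.getD r.toNat []).set c.toNat w) := by
            intro w
            rw [← Int.toNat_of_nonneg h0]
            exact PySem.List.pySet?_natCast _ _ _ (by omega)
          have e8 : ∀ row : List Int, PySem.List.pySet? dp3 r row = some (dp3.set r.toNat row) := by
            intro row
            rw [← Int.toNat_of_nonneg hr0]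
            exact PySem.List.pySet?_natCast _ _ _ (by omega)
          simp only [e7, e8]
          have hW := pvVal_step mine dp0 nn r c h0 hc1' hr0 hrlt hd0
          refine ⟨_, ?_, pvGood_write mine dp0 nn hd dp3 hgc r.toNat c.toNat hrn hcn hd0 _ hW.symm⟩
          conv_rhs => rw [if_pos ⟨hr0, hrlt⟩, hW]

theorem alt_cols (mine dp : List (List Int)) (nn : Nat) :
    ∀ (k : Nat), k < nn →
      (PySem.List.pyRange ((nn:Int)-1) (((nn:Int)-1-k)-1) (-1)).foldl (fun prev col =>
        some ((List.range mine.length).foldl (fun acc row =>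
          acc ++ [pvCell mine dp (nn:Int) prev col row]) [])) none
      = some ((List.range mine.length).map (pvVal mine dp nn k)) := by
  intro k
  induction k with
  | zero =>
    intro hk
    have h0 : ((nn:Int)-1-(0:Nat))-1 = ((nn:Int)-1)-1 := by simp
    rw [h0, pvRange_single]
    simp only [List.foldl_cons, List.foldl_nil]
    rw [PySem.List.foldl_append_singleton_eq_map, List.nil_append]
    congr 1
    refine List.map_congr_left ?_
    intro row hrow
    have hcast : (nn:Int) - 1 = ((nn - 1 : Nat) : Int) := by omega
    simp only [pvCell, hcast, PySem.List.pyGetD_natCast]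
    simp only [pvVal]
    by_cases h1 : (dp.getD row []).getD (nn-1) 0 ≠ -1
    · rw [if_pos h1, if_pos h1]
    · rw [if_neg h1, if_neg h1]; simp
  | succ j ihj =>
    intro hk
    have hsnoc : PySem.List.pyRange ((nn:Int)-1) (((nn:Int)-1-((j:Int)+1))-1) (-1)
        = PySem.List.pyRange ((nn:Int)-1) (((nn:Int)-1-(j:Int))-1) (-1) ++ [(nn:Int)-1-((j:Int)+1)] := by
      have h := pvRange_snoc ((nn:Int)-1) (((nn:Int)-1-((j:Int)+1))-1) (by omega)
      rw [h]
      congr 2 <;> ring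
    rw [show (((j:Nat)+1 : Nat) : Int) = (j:Int)+1 by push_cast; ring] at *
    rw [hsnoc, List.foldl_append, ihj (by omega)]
    simp only [List.foldl_cons, List.foldl_nil]
    rw [PySem.List.foldl_append_singleton_eq_map, List.nil_append]
    congr 1
    refine List.map_congr_left ?_
    intro row hrow
    have hrowlt : row < mine.length := List.mem_range.mp hrow
    have hcol : (nn:Int) - 1 - ((j:Int)+1) = ((nn - 1 - (j+1) : Nat) : Int) := by omega
    simp only [pvCell, Option.getD_some]
    rw [hcol, PySem.List.pyGetD_natCast, PySem.List.pyGetD_natCast]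
    rw [if_neg (show ¬(((nn - 1 - (j+1) : Nat) : Int) = (nn:Int)-1) by omega)]
    simp only [pvVal]
    by_cases hdv : (dp.getD row []).getD (nn-1-(j+1)) 0 ≠ -1
    · rw [if_pos hdv, if_pos hdv]
    · rw [if_neg hdv, if_neg hdv]
      rw [PySem.List.getD_map_range _ _ _ _ (show row - 1 < mine.length by omega),
          PySem.List.getD_map_range _ _ _ _ hrowlt]
      by_cases h3 : row + 1 < mine.length
      · rw [if_pos h3, if_pos h3, PySem.List.getD_map_range _ _ _ _ h3]
      · rw [if_neg h3, if_neg h3]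

theorem pvAux_out (fuel : Nat) (r c : Int) (mine dp : List (List Int))
    (h : r < 0 ∨ (mine.length : Int) ≤ r) :
    maxGoldMemoAux (fuel+1) r c mine dp = some (0, dp) := by
  simp only [maxGoldMemoAux, if_pos h]

-- ===== VERDICT (by name: the statement is the Claim_ definition above) =====
set_option maxRecDepth 8192 in
theorem maxGoldMemo_spec : Claim_equal_maxGoldMemo := by
  unfold Claim_equal_maxGoldMemo
  intro r c mine dp hdom hpre
  unfold Spec_maxGoldMemo
  by_cases hr : r < 0 ∨ (mine.length : Int) ≤ r
  · have hB : maxGoldMemo_alt r c mine dp = 0 := by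
      unfold maxGoldMemo_alt
      rw [if_pos hr]
    have hA : maxGoldMemo r c mine dp = 0 := by
      have h1 : maxGoldMemoAux (pvFuel dp) r c mine dp = some (0, dp) := by
        rw [show pvFuel dp = (dp.foldl (fun m row => max m row.length) 0 + 4294967298) + 1 from by
          unfold pvFuel; omega]
        exact pvAux_out _ _ _ _ _ hr
      unfold maxGoldMemo
      rw [h1]
      rfl
    rw [hA, hB]
  · push_neg at hr
    obtain ⟨hr0, hrlt⟩ := hr
    rcases hpre with hout | ⟨hlen, htake, hm, hc0, hc1⟩
    · omega
    have hrows : 0 < mine.length := by omega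
    have hnpos : 0 < (mine.headD []).length := by omega
    have hd : ∀ i < mine.length, (mine.headD []).length ≤ (dp.getD i []).length := by
      intro i hi
      have hidx : i < dp.length := by omega
      have hti : i < (dp.take mine.length).length := by simp; omega
      refine htake _ ?_
      rw [List.getD_eq_getElem _ _ hidx]
      have he : (dp.take mine.length)[i] = dp[i] := List.getElem_take
      rw [← he]
      exact List.getElem_mem hti
    have hGood0 : pvGood mine dp (mine.headD []).length dp :=
      ⟨rfl, fun i _ => ⟨rfl, fun k _ => Or.inl rfl⟩⟩
    have hfe : (mine.headD []).length - c.toNat ≤ pvFuel dp := by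
      have h1 : (mine.headD []).length ≤ dp.foldl (fun m row => max m row.length) 0 := by
        have hmem : dp.getD 0 [] ∈ dp := by
          rw [List.getD_eq_getElem _ _ (by omega : 0 < dp.length)]
          exact List.getElem_mem (by omega)
        have h2 := pvFoldlMax_ge dp (dp.getD 0 []) hmem 0
        have h3 := hd 0 hrows
        omega
      unfold pvFuel; omega
    obtain ⟨dp'', hA, _⟩ := aux_ok mine dp (mine.headD []).length rfl hm hlen hd (pvFuel dp) r c dp hc0 hc1 hfe hGood0
    have hAval : maxGoldMemo r c mine dp
        = pvVal mine dp (mine.headD []).length ((mine.headD []).length - 1 - c.toNat) r.toNat := by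
      unfold maxGoldMemo
      rw [hA]
      simp only [Option.map_some, Option.getD_some]
      rw [if_pos ⟨hr0, hrlt⟩]
    have hk : (mine.headD []).length - 1 - c.toNat < (mine.headD []).length := by omega
    have hcols := alt_cols mine dp (mine.headD []).length ((mine.headD []).length - 1 - c.toNat) hk
    rw [show (((mine.headD []).length : Int) - 1 - (((mine.headD []).length - 1 - c.toNat : Nat) : Int)) - 1
        = c - 1 from by omega] at hcols
    have hBval : maxGoldMemo_alt r c mine dp
        = pvVal mine dp (mine.headD []).length ((mine.headD []).length - 1 - c.toNat) r.toNat := by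
      unfold maxGoldMemo_alt
      rw [if_neg (by omega)]
      simp only [hcols]
      rw [PySem.List.pyGetD_of_nonneg _ _ hr0,
          PySem.List.getD_map_range _ _ _ _ (by omega : r.toNat < mine.length)]
    rw [hAval, hBval]
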